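-- pv_equiv track=rewrite | github.com/Brian-Serrano/My-SoloLearn-Codes | SoloLearn Codes/Word Rank/word_rank.py | find_common_fact
-- ===== SOURCE A (Python) =====
-- def find_common_fact(k, b):
--     abc = "ABCDEFGHIJKLMNOPQRSTUVWXYZ"
--     result = 1
--     a = k[b:]
--     common = []
--     for i in range(len(abc)):
--         count = a.count(abc[i])
--         if count > 1:
--             common.append(count)
--     for i in range(len(common)):
--         result *= fact(common[i])
--     return result
--
-- def fact(n):
--     if n <= 1:
--         return 1
--     else:
--         return fact(n - 1) * n
-- ===== SOURCE B (Python) =====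
-- def find_common_fact(k, b):
--     abc = "ABCDEFGHIJKLMNOPQRSTUVWXYZ"
--     counts = {}
--     for ch in k[b:]:
--         if ch in abc:
--             counts[ch] = counts.get(ch, 0) + 1
--     result = 1
--     for c in counts.values():
--         if c > 1:
--             f = 1
--             for i in range(2, c + 1):
--                 f *= i
--             result *= f
--     return result
-- ===== Notes on version B (the rewrite author's own statement) =====
-- stated objective: alternative
-- what changed: B replaces A's 26 per-letter .count scans and the intermediate 'common' list with one dictionary-counting pass over k[b:] followed by a pass over the count values, computing each factorial iteratively instead of recursively; asymptotically one pass instead of 26, though CPython's C-level str.count makes A comparable in wall time.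
import Mathlib
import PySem

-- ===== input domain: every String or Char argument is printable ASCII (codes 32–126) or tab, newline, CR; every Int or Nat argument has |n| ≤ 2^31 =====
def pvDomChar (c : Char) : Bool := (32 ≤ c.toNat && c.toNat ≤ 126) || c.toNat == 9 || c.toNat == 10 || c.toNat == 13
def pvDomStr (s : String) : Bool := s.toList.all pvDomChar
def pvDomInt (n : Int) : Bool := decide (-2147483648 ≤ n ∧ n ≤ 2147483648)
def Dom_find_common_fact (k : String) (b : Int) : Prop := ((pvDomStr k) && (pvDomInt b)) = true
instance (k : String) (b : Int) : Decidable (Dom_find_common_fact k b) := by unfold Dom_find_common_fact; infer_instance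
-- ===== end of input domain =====

-- B builds one frequency dictionary over k[b:] instead of A's 26 per-letter count scans,
-- and multiplies iteratively-computed factorials of the repeated counts (same return value).

-- ===== PORT A =====
-- fact(n): recursive factorial, exactly A's helper
def factA (n : Int) : Int :=
  if n ≤ 1 then 1 else factA (n - 1) * n
termination_by n.toNat
decreasing_by omega

def find_common_fact (k : String) (b : Int) : Int :=
  let abc : List Char := "ABCDEFGHIJKLMNOPQRSTUVWXYZ".toList
  let a : List Char := PySem.List.slice k.toList (some b) none
  -- for i in range(len(abc)): count = a.count(abc[i]); if count > 1: common.append(count)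
  let common : List Int :=
    (PySem.List.pyRange 0 (abc.length : Int) 1).foldl
      (fun acc i =>
        let count : Int := (a.count (PySem.List.pyGetD abc i 'A') : Int)
        if count > 1 then acc ++ [count] else acc) []
  -- for i in range(len(common)): result *= fact(common[i])
  (PySem.List.pyRange 0 (common.length : Int) 1).foldl
    (fun r i => r * factA (PySem.List.pyGetD common i 0)) 1

-- ===== PORT B =====
-- inner loop 'f = 1; for i in range(2, c+1): f *= i'
def iterFact (c : Int) : Int :=
  (PySem.List.pyRange 2 (c + 1) 1).foldl (fun f i => f * i) 1

def find_common_fact_alt (k : String) (b : Int) : Int :=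
  let abc : List Char := "ABCDEFGHIJKLMNOPQRSTUVWXYZ".toList
  -- for ch in k[b:]: if ch in abc: counts[ch] = counts.get(ch, 0) + 1
  let counts : PySem.Dict Char Int :=
    (PySem.List.slice k.toList (some b) none).foldl
      (fun d ch => if ch ∈ abc then d.insert ch (d.getD ch 0 + 1) else d)
      PySem.Dict.empty
  -- for c in counts.values(): if c > 1: result *= iterative factorial of c
  counts.values.foldl (fun r c => if c > 1 then r * iterFact c else r) 1

-- ===== PRECONDITION & SPEC =====
def Spec_find_common_fact (k : String) (b : Int) (out : Int) : Prop := out = find_common_fact_alt k b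
instance (k : String) (b : Int) (out : Int) : Decidable (Spec_find_common_fact k b out) := by unfold Spec_find_common_fact; infer_instance

-- ===== CLAIM (what is proved, stated in full; the proofs are below) =====
def Claim_equal_find_common_fact : Prop := ∀ (k : String) (b : Int), Dom_find_common_fact k b → Spec_find_common_fact k b (find_common_fact k b)

-- ===== LEMMAS AND PROOFS =====

-- B's loop 'result *= f(c)' as a product
theorem foldl_mul {α : Type} (f : α → Int) (l : List α) (a : Int) :
    l.foldl (fun r c => r * f c) a = a * (l.map f).prod := by
  induction l generalizing a with
  | nil => simp
  | cons h t ih => simp [ih, mul_assoc]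

-- B's iterative factorial equals A's recursive fact on natural counts
theorem iterFact_natCast (m : Nat) : iterFact (m : Int) = factA (m : Int) := by
  induction m with
  | zero => simp [iterFact, factA]
  | succ n ih =>
    by_cases hn : n = 0
    · subst hn
      simp [iterFact, factA]
    · have h2 : (2:Int) ≤ (n:Int) + 1 := by omega
      rw [iterFact]
      push_cast
      rw [PySem.List.pyRange_one_succ_right h2, List.foldl_append]
      have : (PySem.List.pyRange 2 ((n:Int) + 1) 1).foldl (fun f i => f * i) 1 = iterFact (n:Int) := rfl
      rw [List.foldl_cons, List.foldl_nil, this, ih]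
      conv_rhs => rw [factA]
      have h3 : ¬ ((n:Int) + 1 ≤ 1) := by omega
      simp only [h3, if_false, add_sub_cancel_right]

theorem find_common_fact_eq (k : String) (b : Int) : find_common_fact k b = find_common_fact_alt k b := by
  unfold find_common_fact find_common_fact_alt
  set abc : List Char := "ABCDEFGHIJKLMNOPQRSTUVWXYZ".toList with habc
  set a : List Char := PySem.List.slice k.toList (some b) none with ha
  simp only
  rw [PySem.List.foldl_pyRange_zero_pyGetD' (f := fun r c => r * factA c) (d := 0),
      PySem.List.foldl_pyRange_zero_pyGetD'
        (f := fun acc c => if ((a.count c : Int)) > 1 then acc ++ [(a.count c : Int)] else acc) (d := 'A'),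
      PySem.List.foldl_append_ite (p := fun c => ((a.count c : Int)) > 1) (f := fun c => (a.count c : Int)),
      PySem.List.foldl_ite_eq_foldl_filter (p := fun ch => ch ∈ abc),
      PySem.Dict.foldl_insert_getD_add_one_eq_counter]
  rw [foldl_mul, PySem.Dict.values, PySem.Dict.items_counter, List.map_map,
      PySem.List.foldl_ite_eq_foldl_filter (p := fun c : Int => c > 1),
      foldl_mul]
  simp only [one_mul, List.nil_append, Function.comp_def, List.map_map]
  rw [List.filter_map]
  set f : List Char := List.filter (fun x => decide (x ∈ abc)) a with hf
  set S : List Char := PySem.Set.ofList f with hS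
  have hcount : ∀ x ∈ S, (List.count x f : Int) = (List.count x a : Int) := by
    intro x hx
    have hxf : x ∈ f := (PySem.Set.mem_ofList f x).mp hx
    have hxabc : decide (x ∈ abc) = true := by
      rw [hf] at hxf; exact (List.mem_filter.mp hxf).2
    rw [hf]
    exact congrArg _ (List.count_filter (p := fun c => decide (c ∈ abc)) hxabc)
  conv_rhs => rw [List.filter_congr (q := fun k => decide ((List.count k a : Int) > 1))
        (by intro x hx; simp only [Function.comp_apply, hcount x hx]), List.map_map]
  conv_rhs => rw [List.map_congr_left
        (h := by
          intro x hx
          have hxS : x ∈ S := List.mem_of_mem_filter hx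
          show iterFact ((List.count x f : Int)) = factA ((List.count x a : Int))
          rw [hcount x hxS, iterFact_natCast])]
  have hperm : (List.filter (fun x => decide ((List.count x a : Int) > 1)) abc).Perm
      (List.filter (fun k => decide ((List.count k a : Int) > 1)) S) := by
    apply (List.perm_ext_iff_of_nodup (List.Nodup.filter _ (by decide))
      (List.Nodup.filter _ (PySem.Set.nodup_ofList f))).mpr
    intro x
    simp only [List.mem_filter, PySem.Set.mem_ofList, hf, decide_eq_true_eq, gt_iff_lt]
    constructor
    · rintro ⟨hxabc, hgt⟩
      have hxa : x ∈ a := List.count_pos_iff.mp (by omega)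
      exact ⟨⟨hxa, hxabc⟩, hgt⟩
    · rintro ⟨⟨_, hxabc⟩, hgt⟩
      exact ⟨hxabc, hgt⟩
  exact List.Perm.prod_eq (hperm.map _)

-- ===== VERDICT (by name: the statement is the Claim_ definition above) =====
theorem find_common_fact_spec : Claim_equal_find_common_fact := by
  intro k b _
  show find_common_fact k b = find_common_fact_alt k b
  exact find_common_fact_eq k b
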